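-- pv_equiv track=rewrite | github.com/ADITYADAS1999/Triangulation_Encryption_Decryption | Main_project_file/MY_CODE - LARGEFILE - Copy.py | content_to_binary_chunks
-- ===== SOURCE A (Python) =====
-- def content_to_binary_chunks(content, shuffled_lengths):
--     binary_chunks = []
--     index = 0
--     for length in shuffled_lengths:
--         chunk = content[index:index + (length // 8)]
--         if chunk:  # Ensure chunk is not empty
--             binary_chunk = ''.join(format(ord(c), '08b') for c in chunk)
--             binary_chunks.append(binary_chunk)
--         index += (length // 8)
--     return binary_chunks
-- ===== SOURCE B (Python) =====
-- def content_to_binary_chunks(content, shuffled_lengths):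
--     # Pass 1: cumulative slice boundaries; Pass 2: slice, encode, keep non-empty.
--     offsets = [0]
--     for length in shuffled_lengths:
--         offsets.append(offsets[-1] + length // 8)
--     slices = [content[a:b] for a, b in zip(offsets, offsets[1:])]
--     return [''.join(format(ord(c), '08b') for c in s) for s in slices if s]
-- ===== Notes on version B (the rewrite author's own statement) =====
-- stated objective: alternative
-- what changed: B first builds the cumulative offset table of slice boundaries, then in a separate pass slices, filters non-empty chunks and encodes them, instead of A's single loop carrying a running index and an output accumulator.
import Mathlib
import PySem

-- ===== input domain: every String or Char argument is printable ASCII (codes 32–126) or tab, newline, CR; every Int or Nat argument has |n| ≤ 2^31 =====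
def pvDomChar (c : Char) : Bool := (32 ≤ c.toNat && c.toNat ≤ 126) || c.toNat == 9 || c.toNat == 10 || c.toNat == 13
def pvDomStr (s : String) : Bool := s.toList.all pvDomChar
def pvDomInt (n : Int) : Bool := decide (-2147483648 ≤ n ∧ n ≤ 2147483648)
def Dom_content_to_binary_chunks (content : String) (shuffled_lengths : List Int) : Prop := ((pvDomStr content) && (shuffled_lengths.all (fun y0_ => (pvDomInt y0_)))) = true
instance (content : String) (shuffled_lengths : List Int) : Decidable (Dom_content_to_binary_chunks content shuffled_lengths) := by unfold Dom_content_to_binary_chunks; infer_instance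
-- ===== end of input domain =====

-- B builds the cumulative offset table first, then slices/filters/encodes in a second pass,
-- replacing A's single loop with a running index (objective: alternative decomposition).

-- format(ord(c), '08b'): the 8-bit binary string of a character (exact for codes < 256,
-- which Dom guarantees); shared by both ports since both Pythons contain this expression.
def pvBin8 (c : Char) : String :=
  String.ofList ((List.range 8).map (fun i => if (c.toNat >>> (7 - i)) % 2 = 1 then '1' else '0'))

-- ''.join(format(ord(c), '08b') for c in s)
def pvBinJoin (s : List Char) : String := String.join (s.map pvBin8)

-- ===== PORT A =====
def content_to_binary_chunks (content : String) (shuffled_lengths : List Int) : List String :=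
  (shuffled_lengths.foldl
    (fun (st : List String × Int) (length : Int) =>
      let k := PySem.Int.floordiv length 8
      let chunk := PySem.Str.slice content (some st.2) (some (st.2 + k))
      let acc := if chunk ≠ "" then st.1 ++ [pvBinJoin chunk.toList] else st.1
      (acc, st.2 + k))
    ([], 0)).1

-- ===== PORT B =====
def content_to_binary_chunks_alt (content : String) (shuffled_lengths : List Int) : List String :=
  let offsets := shuffled_lengths.foldl
    (fun (acc : List Int) (l : Int) => acc ++ [acc.getLastD 0 + PySem.Int.floordiv l 8]) [0]
  let slices := (offsets.zip offsets.tail).map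
    (fun p => PySem.Str.slice content (some p.1) (some p.2))
  (slices.filter (fun s => s ≠ "")).map (fun s => pvBinJoin s.toList)

-- ===== PRECONDITION & SPEC =====
def Spec_content_to_binary_chunks (content : String) (shuffled_lengths : List Int) (out : List String) : Prop := out = content_to_binary_chunks_alt content shuffled_lengths
instance (content : String) (shuffled_lengths : List Int) (out : List String) : Decidable (Spec_content_to_binary_chunks content shuffled_lengths out) := by unfold Spec_content_to_binary_chunks; infer_instance

-- ===== CLAIM (what is proved, stated in full; the proofs are below) =====
def Claim_equal_content_to_binary_chunks : Prop := ∀ (content : String) (shuffled_lengths : List Int), Dom_content_to_binary_chunks content shuffled_lengths → Spec_content_to_binary_chunks content shuffled_lengths (content_to_binary_chunks content shuffled_lengths)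

-- ===== LEMMAS AND PROOFS =====

-- cumulative offsets starting after i
def pvCum (ls : List Int) (i : Int) : List Int :=
  match ls with
  | [] => []
  | l :: ls' => (i + PySem.Int.floordiv l 8) :: pvCum ls' (i + PySem.Int.floordiv l 8)

-- common reference result: chunks produced from running index i
def pvG (content : String) (ls : List Int) (i : Int) : List String :=
  match ls with
  | [] => []
  | l :: ls' =>
    let j := i + PySem.Int.floordiv l 8
    let chunk := PySem.Str.slice content (some i) (some j)
    (if chunk ≠ "" then [pvBinJoin chunk.toList] else []) ++ pvG content ls' j

theorem pvFoldA_eq (content : String) (ls : List Int) :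
    ∀ (acc : List String) (i : Int),
    (ls.foldl
      (fun (st : List String × Int) (length : Int) =>
        let k := PySem.Int.floordiv length 8
        let chunk := PySem.Str.slice content (some st.2) (some (st.2 + k))
        let acc := if chunk ≠ "" then st.1 ++ [pvBinJoin chunk.toList] else st.1
        (acc, st.2 + k))
      (acc, i)).1 = acc ++ pvG content ls i := by
  induction ls with
  | nil => intro acc i; simp [pvG]
  | cons l ls ih =>
    intro acc i
    simp only [List.foldl_cons, pvG]
    rw [ih]
    split_ifs <;> simp

theorem pvFoldB_eq (ls : List Int) :
    ∀ (pre : List Int) (i : Int),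
    (ls.foldl
      (fun (acc : List Int) (l : Int) => acc ++ [acc.getLastD 0 + PySem.Int.floordiv l 8])
      (pre ++ [i])) = (pre ++ [i]) ++ pvCum ls i := by
  induction ls with
  | nil => intro pre i; simp [pvCum]
  | cons l ls ih =>
    intro pre i
    simp only [List.foldl_cons]
    have h : (pre ++ [i]).getLastD 0 = i := by simp
    rw [h]
    have := ih (pre ++ [i]) (i + PySem.Int.floordiv l 8)
    simp only [List.append_assoc] at this ⊢
    rw [this]
    simp [pvCum]

theorem pvZip_eq (content : String) (ls : List Int) :
    ∀ (i : Int),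
    ((((i :: pvCum ls i).zip (pvCum ls i)).map
        (fun p => PySem.Str.slice content (some p.1) (some p.2))).filter
          (fun s => s ≠ "")).map (fun s => pvBinJoin s.toList) = pvG content ls i := by
  induction ls with
  | nil => intro i; simp [pvCum, pvG]
  | cons l ls ih =>
    intro i
    simp only [pvCum, pvG, List.zip_cons_cons, List.map_cons, List.filter_cons]
    by_cases h : PySem.Str.slice content (some i) (some (i + l / 8)) = ""
    · rw [if_neg (by simp [h]), if_neg (by simp [h]), ih]
      simp
    · rw [if_pos (by simp [h]), if_pos (by simp [h]), List.map_cons, ih]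
      simp

-- ===== VERDICT (by name: the statement is the Claim_ definition above) =====
theorem content_to_binary_chunks_spec : Claim_equal_content_to_binary_chunks := by
  intro content ls _
  unfold Spec_content_to_binary_chunks content_to_binary_chunks content_to_binary_chunks_alt
  rw [pvFoldA_eq content ls [] 0]
  have hB := pvFoldB_eq ls [] 0
  simp only [List.nil_append] at hB
  rw [hB]
  simp only [List.nil_append, List.singleton_append, List.tail_cons]
  exact (pvZip_eq content ls 0).symm
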